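-- pv_equiv track=rewrite | github.com/denisgubin/share_scripts | convert_dec_12bit_to_hex_16bit.py | convert_dec_12bit_to_hex_16bit
-- ===== SOURCE A (Python) =====
-- def convert_dec_12bit_to_hex_16bit(dec):
--     """
--     Функция преобразует десятичное значение для 12 bit в hex значение 16 bit
--     :param dec: integer
--     :return: hex
--     """
--
--     if dec not in range(0, 4096):
--         raise Exception('The decimal integer should be in range between 0 to 4095')
--     tmp = bin(dec)[2:]
--     tmp = tmp.zfill(16)
--     # return hex(int(tmp, 2))
--     four_i = ""
--     l = []
--     for i in tmp:
--         four_i += i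
--         if len(four_i) == 4:
--             l.append(four_i)
--             four_i = ""
--     return '0x' + ''.join([hex(int(b, 2))[2:] for b in l])
-- ===== SOURCE B (Python) =====
-- def convert_dec_12bit_to_hex_16bit(dec):
--     """Same conversion by arithmetic nibble extraction instead of building a binary string."""
--     if dec not in range(0, 4096):
--         raise Exception('The decimal integer should be in range between 0 to 4095')
--     digits = '0123456789abcdef'
--     return '0x' + ''.join(digits[(dec >> s) & 0xF] for s in (12, 8, 4, 0))
-- ===== Notes on version B (the rewrite author's own statement) =====
-- stated objective: idiomatic
-- what changed: Replaces the binary-string construction (bin, zfill to sixteen chars, four-char chunking loop, int-base-two re-parsing) with direct arithmetic nibble extraction: each hex digit is looked up in a hex-digit table indexed by the shifted-and-masked nibble, one per nibble position of the sixteen-bit word.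
import Mathlib
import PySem

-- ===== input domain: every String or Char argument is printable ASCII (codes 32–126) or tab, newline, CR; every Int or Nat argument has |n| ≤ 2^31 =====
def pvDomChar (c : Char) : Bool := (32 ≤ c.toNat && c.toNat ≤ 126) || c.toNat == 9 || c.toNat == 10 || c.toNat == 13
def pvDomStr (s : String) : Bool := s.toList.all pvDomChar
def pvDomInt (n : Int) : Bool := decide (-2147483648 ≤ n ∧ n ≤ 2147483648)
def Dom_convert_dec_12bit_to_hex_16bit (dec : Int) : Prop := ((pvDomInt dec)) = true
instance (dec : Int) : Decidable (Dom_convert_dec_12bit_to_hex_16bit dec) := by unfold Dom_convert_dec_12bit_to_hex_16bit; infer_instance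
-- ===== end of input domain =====

-- B replaces A's binary-string build / zfill(16) / 4-char chunking with direct arithmetic
-- nibble extraction through a hex-digit table (objective: idiomatic, same return value on Pre_).

-- ===== PORT A =====
-- bin(n)[2:] as a list of chars, MSB first, for n ≥ 1 (fuel-bounded; fuel ≥ n suffices)
def pvBinAux : Nat → Nat → List Char
  | _, 0 => []
  | 0, _ => []
  | fuel+1, n => pvBinAux fuel (n / 2) ++ [if n % 2 = 1 then '1' else '0']

-- bin(n)[2:] (Python: bin(0) = '0b0')
def pvBin (n : Nat) : List Char := if n = 0 then ['0'] else pvBinAux n n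

-- tmp.zfill(16)
def pvZfill16 (l : List Char) : List Char := List.replicate (16 - l.length) '0' ++ l

-- one step of the for-loop: state (l, four_i)
def pvChunkStep (st : List (List Char) × List Char) (c : Char) : List (List Char) × List Char :=
  let four := st.2 ++ [c]
  if four.length = 4 then (st.1 ++ [four], []) else (st.1, four)

-- int(b, 2) for a string of '0'/'1'
def pvInt2 (b : List Char) : Nat := b.foldl (fun a c => 2 * a + (if c = '1' then 1 else 0)) 0

-- hex(m)[2:] for 0 ≤ m ≤ 15 (a single digit)
def pvHexDigit (m : Nat) : Char := "0123456789abcdef".toList.getD m '0'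

def convert_dec_12bit_to_hex_16bit (dec : Int) : String :=
  if dec < 0 ∨ 4096 ≤ dec then "" else  -- Python raises Exception here; excluded by Pre_
    let tmp := pvZfill16 (pvBin dec.toNat)
    let st := tmp.foldl pvChunkStep ([], [])
    "0x" ++ String.ofList (st.1.map (fun b => pvHexDigit (pvInt2 b)))

-- ===== PORT B =====
def convert_dec_12bit_to_hex_16bit_alt (dec : Int) : String :=
  if dec < 0 ∨ 4096 ≤ dec then "" else  -- Python raises Exception here; excluded by Pre_
    "0x" ++ String.ofList ([12, 8, 4, 0].map (fun s => pvHexDigit ((dec.toNat >>> s) &&& 15)))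

-- ===== PRECONDITION & SPEC =====
-- exactly the inputs on which the Python A returns (on all others it raises Exception)
def Pre_convert_dec_12bit_to_hex_16bit (dec : Int) : Prop := 0 ≤ dec ∧ dec < 4096
instance (dec : Int) : Decidable (Pre_convert_dec_12bit_to_hex_16bit dec) := by
  unfold Pre_convert_dec_12bit_to_hex_16bit; infer_instance

def pvWitness_convert_dec_12bit_to_hex_16bit : Int := 2748

def Spec_convert_dec_12bit_to_hex_16bit (dec : Int) (out : String) : Prop := out = convert_dec_12bit_to_hex_16bit_alt dec
instance (dec : Int) (out : String) : Decidable (Spec_convert_dec_12bit_to_hex_16bit dec out) := by unfold Spec_convert_dec_12bit_to_hex_16bit; infer_instance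

-- ===== CLAIM (what is proved, stated in full; the proofs are below) =====
def Claim_equal_convert_dec_12bit_to_hex_16bit : Prop := ∀ (dec : Int), Dom_convert_dec_12bit_to_hex_16bit dec → Pre_convert_dec_12bit_to_hex_16bit dec → Spec_convert_dec_12bit_to_hex_16bit dec (convert_dec_12bit_to_hex_16bit dec)

-- ===== LEMMAS AND PROOFS =====

-- the k-bit big-endian binary rendering of n (faithful for n < 2^k)
def pvBitChar (n : Nat) : Char := if n % 2 = 1 then '1' else '0'
def pvBits : Nat → Nat → List Char
  | 0, _ => []
  | k+1, n => pvBits k (n / 2) ++ [pvBitChar n]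

theorem pvBits_zero (k : Nat) : pvBits k 0 = List.replicate k '0' := by
  induction k with
  | zero => rfl
  | succ k ih => simp [pvBits, ih, pvBitChar, List.replicate_succ']

-- pvBinAux does not depend on the fuel once the fuel is ≥ n
theorem pvBinAux_fuel (n : Nat) : ∀ f₁ f₂, n ≤ f₁ → n ≤ f₂ → pvBinAux f₁ n = pvBinAux f₂ n := by
  induction n using Nat.strong_induction_on with
  | _ n ih =>
    intro f₁ f₂ h₁ h₂
    match n, f₁, f₂ with
    | 0, f₁, f₂ => cases f₁ <;> cases f₂ <;> rfl
    | n+1, f₁+1, f₂+1 =>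
      simp only [pvBinAux]
      have hd : (n+1) / 2 < n + 1 := Nat.div_lt_self (Nat.succ_pos n) (by omega)
      rw [ih ((n+1)/2) hd f₁ ((n+1)/2) (by omega) (le_refl _),
          ih ((n+1)/2) hd f₂ ((n+1)/2) (by omega) (le_refl _)]

-- the recursion bin(n) = bin(n // 2) + bit(n % 2) for n ≥ 2
theorem pvBin_step (n : Nat) (h : 2 ≤ n) : pvBin n = pvBin (n / 2) ++ [pvBitChar n] := by
  have h2 : n / 2 ≠ 0 := by omega
  obtain ⟨m, rfl⟩ : ∃ m, n = m + 1 := ⟨n - 1, by omega⟩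
  simp only [pvBin, if_neg (by omega : ¬ m + 1 = 0), if_neg h2, pvBinAux, pvBitChar]
  rw [pvBinAux_fuel ((m+1)/2) m ((m+1)/2) (by omega) (le_refl _)]

-- zfill of bin(n) to k+1 digits is the (k+1)-bit big-endian rendering
theorem pvZfill_bin (k : Nat) : ∀ n, n < 2 ^ (k+1) →
    List.replicate (k + 1 - (pvBin n).length) '0' ++ pvBin n = pvBits (k+1) n := by
  induction k with
  | zero =>
    intro n hn
    interval_cases n <;> rfl
  | succ k ih =>
    intro n hn
    by_cases h1 : n < 2
    · have hb : pvBin n = [pvBitChar n] := by interval_cases n <;> rfl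
      have h0 : n / 2 = 0 := by omega
      simp [pvBits, hb, h0, pvBits_zero, List.replicate_succ', pvBitChar]
    · rw [pvBin_step n (by omega)]
      have harith : k + 1 + 1 - ((pvBin (n/2)).length + 1) = k + 1 - (pvBin (n/2)).length := by omega
      simp only [List.length_append, List.length_cons, List.length_nil, Nat.zero_add, harith,
        pvBits, ← List.append_assoc]
      rw [ih (n/2) (by omega)]
      simp [pvBits]

-- pvBits splits off the low nibble
theorem pvBits_split (k n : Nat) : pvBits (k+4) n = pvBits k (n / 16) ++ pvBits 4 (n % 16) := by
  have e8 : pvBitChar (n % 16 / 8) = pvBitChar (n / 8) := by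
    have : n % 16 / 8 % 2 = n / 8 % 2 := by omega
    simp [pvBitChar, this]
  have e4 : pvBitChar (n % 16 / 4) = pvBitChar (n / 4) := by
    have : n % 16 / 4 % 2 = n / 4 % 2 := by omega
    simp [pvBitChar, this]
  have e2 : pvBitChar (n % 16 / 2) = pvBitChar (n / 2) := by
    have : n % 16 / 2 % 2 = n / 2 % 2 := by omega
    simp [pvBitChar, this]
  have e1 : pvBitChar (n % 16) = pvBitChar n := by
    have : n % 16 % 2 = n % 2 := by omega
    simp [pvBitChar, this]
  have d1 : n / 2 / 2 = n / 4 := by omega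
  have d2 : n / 4 / 2 = n / 8 := by omega
  have d3 : n / 8 / 2 = n / 16 := by omega
  have d4 : n % 16 / 2 / 2 = n % 16 / 4 := by omega
  have d5 : n % 16 / 4 / 2 = n % 16 / 8 := by omega
  have d6 : n % 16 / 8 / 2 = 0 := by omega
  simp [pvBits, d1, d2, d3, d4, d5, e8, e4, e2, e1]

-- the for-loop consumes one 4-char group per append to l
theorem pvChunk_group (l : List (List Char)) (a b c d : Char) (rest : List Char) :
    List.foldl pvChunkStep (l, []) ([a, b, c, d] ++ rest) = List.foldl pvChunkStep (l ++ [[a, b, c, d]], []) rest := by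
  simp [pvChunkStep, List.foldl]

-- pvBits 4 m always has the explicit 4-element shape
theorem pvBits4_shape (n : Nat) :
    pvBits 4 n = [pvBitChar (n / 8), pvBitChar (n / 4), pvBitChar (n / 2), pvBitChar n] := by
  have d1 : n / 2 / 2 = n / 4 := by omega
  have d2 : n / 4 / 2 = n / 8 := by omega
  show pvBits 0 (n/2/2/2/2) ++ [pvBitChar (n/2/2/2)] ++ [pvBitChar (n/2/2)] ++ [pvBitChar (n/2)] ++ [pvBitChar n] = _
  rw [d1, d2]
  rfl

-- int(·, 2) inverts the 4-bit rendering
theorem pvInt2_bits4 (n : Nat) : pvInt2 (pvBits 4 n) = n % 16 := by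
  rw [pvBits4_shape]
  simp only [pvInt2, pvBitChar, List.foldl_cons, List.foldl_nil]
  split_ifs <;> simp_all <;> omega

-- the whole A-side pipeline on a 16-bit value, nibble by nibble
theorem pvPipeline (n : Nat) (hn : n < 4096) :
    convert_dec_12bit_to_hex_16bit (n : Int) = convert_dec_12bit_to_hex_16bit_alt (n : Int) := by
  have hneg : ¬ ((n : Int) < 0 ∨ 4096 ≤ (n : Int)) := by omega
  have hlt : n < 2 ^ 16 := by omega
  have htmp : pvZfill16 (pvBin n) = pvBits 16 n := by
    simpa [pvZfill16] using pvZfill_bin 15 n hlt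
  have hsplit : pvBits 16 n
      = pvBits 4 (n / 4096) ++ (pvBits 4 (n / 256 % 16) ++ (pvBits 4 (n / 16 % 16) ++ pvBits 4 (n % 16))) := by
    have s1 := pvBits_split 12 n
    have s2 := pvBits_split 8 (n / 16)
    have s3 := pvBits_split 4 (n / 16 / 16)
    have d1 : n / 16 / 16 = n / 256 := by omega
    have d2 : n / 16 / 16 / 16 = n / 4096 := by omega
    rw [s1, s2, s3, d1, d2] at *
    simp
  have hchunk : (List.foldl pvChunkStep ([], []) (pvBits 16 n)).1
      = [pvBits 4 (n / 4096), pvBits 4 (n / 256 % 16), pvBits 4 (n / 16 % 16), pvBits 4 (n % 16)] := by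
    rw [hsplit, pvBits4_shape (n / 4096), pvBits4_shape (n / 256 % 16),
        pvBits4_shape (n / 16 % 16), pvBits4_shape (n % 16)]
    rw [pvChunk_group, pvChunk_group, pvChunk_group]
    rw [show ([pvBitChar (n % 16 / 8), pvBitChar (n % 16 / 4), pvBitChar (n % 16 / 2), pvBitChar (n % 16)] : List Char)
        = [pvBitChar (n % 16 / 8), pvBitChar (n % 16 / 4), pvBitChar (n % 16 / 2), pvBitChar (n % 16)] ++ [] from by simp]
    rw [pvChunk_group]
    simp
  have hand : ∀ m : Nat, m &&& 15 = m % 16 := fun m => Nat.and_two_pow_sub_one_eq_mod m 4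
  have hsh : ∀ m k : Nat, m >>> k = m / 2 ^ k := Nat.shiftRight_eq_div_pow
  simp only [convert_dec_12bit_to_hex_16bit, convert_dec_12bit_to_hex_16bit_alt, if_neg hneg]
  have hm : n / 4096 % 16 = n / 4096 := by omega
  simp only [Int.toNat_natCast, htmp, hchunk, List.map, pvInt2_bits4, hand, hsh, hm]
  have q1 : n / 256 % 16 % 16 = n / 256 % 16 := by omega
  have q2 : n / 16 % 16 % 16 = n / 16 % 16 := by omega
  have q3 : n % 16 % 16 = n % 16 := by omega
  norm_num [q1, q2, q3]
  rw [hm]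

-- ===== VERDICT (by name: the statement is the Claim_ definition above) =====
theorem convert_dec_12bit_to_hex_16bit_spec : Claim_equal_convert_dec_12bit_to_hex_16bit := by
  intro dec _ hpre
  obtain ⟨h0, h1⟩ := hpre
  have hn : dec.toNat < 4096 := by omega
  have := pvPipeline dec.toNat hn
  unfold Spec_convert_dec_12bit_to_hex_16bit
  rwa [Int.toNat_of_nonneg h0] at this
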